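-- pv_equiv track=rewrite | github.com/gvSIGAssociation/gvsig-online | gvsigol_symbology/utils.py | sortFontsArray
-- ===== SOURCE A (Python) =====
-- def sortFontsArray(array):
--     sortedArray = sorted(array)
--     output = {}
--     seen = set()
--     for val in sortedArray:
--         value = str(val)
--         index = value.find(".")
--
--         if index != -1:
--             value = value[0:index]
--
--         if value not in seen:
--             output[value] = value
--             seen.add(value)
--     return output
-- ===== SOURCE B (Python) =====
-- def sortFontsArray(array):
--     # One pass: for each truncated key remember the smallest element producing it.
--     # The first element of a key-group in sorted(array) is that minimum, so sorting
--     # the distinct keys by their representative reproduces A's insertion order.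
--     best = {}
--     for val in array:
--         value = str(val)
--         i = value.find(".")
--         key = value[:i] if i != -1 else value
--         if key not in best or val < best[key]:
--             best[key] = val
--     output = {}
--     for key in sorted(best, key=best.get):
--         output[key] = key
--     return output
-- ===== Notes on version B (the rewrite author's own statement) =====
-- stated objective: alternative
-- what changed: Instead of sorting the whole array and deduplicating with a seen-set in sorted order, B makes one unsorted pass keeping the minimal element per truncated key in a dict, then sorts only the distinct keys by that minimal representative; the first occurrence of a key in sorted(array) is exactly its minimal representative, so order and contents coincide.
import Mathlib
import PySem

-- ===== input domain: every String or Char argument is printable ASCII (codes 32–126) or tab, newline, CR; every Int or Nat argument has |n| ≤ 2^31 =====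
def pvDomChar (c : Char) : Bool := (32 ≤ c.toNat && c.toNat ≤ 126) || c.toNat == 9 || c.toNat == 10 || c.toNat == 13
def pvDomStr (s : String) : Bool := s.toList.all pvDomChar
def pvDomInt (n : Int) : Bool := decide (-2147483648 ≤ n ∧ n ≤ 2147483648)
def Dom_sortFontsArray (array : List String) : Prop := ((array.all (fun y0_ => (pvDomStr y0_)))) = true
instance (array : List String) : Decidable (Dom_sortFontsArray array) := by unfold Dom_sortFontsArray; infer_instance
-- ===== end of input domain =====

-- B uses a different algorithm: one unsorted pass keeping, per truncated key, the minimal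
-- element producing it, then sorts only the distinct keys by that representative (alternative).

-- ===== PORT A =====
def sortFontsArray (array : List String) : List (String × String) :=
  let sortedArray := PySem.List.sorted array (fun x => x) false
  let st := sortedArray.foldl
    (fun (st : PySem.Dict String String × PySem.Set String) val =>
      let value := val                                   -- value = str(val): identity on str
      let index := PySem.Str.find value "."
      let value := if index ≠ -1 then PySem.Str.slice value (some 0) (some index) else value
      if PySem.Set.contains st.2 value then st
      else (st.1.insert value value, PySem.Set.add st.2 value))
    (PySem.Dict.empty, PySem.Set.empty)
  st.1.items

-- ===== PORT B =====
-- the truncation 'value = str(val); cut at first "."' shared by Source B's two uses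
def pvKey (val : String) : String :=
  let value := val                                       -- value = str(val): identity on str
  let index := PySem.Str.find value "."
  if index ≠ -1 then PySem.Str.slice value (some 0) (some index) else value

def sortFontsArray_alt (array : List String) : List (String × String) :=
  let best := array.foldl
    (fun (best : PySem.Dict String String) val =>
      let key := pvKey val
      if !(best.contains key) || decide (val < best.getD key "") then best.insert key val
      else best)
    PySem.Dict.empty
  ((PySem.List.sorted best.keys (fun k => best.getD k "") false).foldl
      (fun (output : PySem.Dict String String) key => output.insert key key)
      PySem.Dict.empty).items

-- ===== PRECONDITION & SPEC =====
def Spec_sortFontsArray (array : List String) (out : List (String × String)) : Prop := out = sortFontsArray_alt array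
instance (array : List String) (out : List (String × String)) : Decidable (Spec_sortFontsArray array out) := by unfold Spec_sortFontsArray; infer_instance

-- ===== CLAIM (what is proved, stated in full; the proofs are below) =====
def Claim_equal_sortFontsArray : Prop := ∀ (array : List String), Dom_sortFontsArray array → Spec_sortFontsArray array (sortFontsArray array)

-- ===== LEMMAS AND PROOFS =====

-- running minimum over a group, as Source B's 'if key not in best or val < best[key]' maintains it
def pvGmin (o : Option String) (v : String) : Option String :=
  some (match o with | none => v | some m => min m v)

def pvMinOf (l : List String) : Option String := l.foldl pvGmin none

-- the minimal element of k's group in s (the first group element when s is sorted)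
def pvMrep (s : List String) (k : String) : String :=
  (pvMinOf (s.filter (fun v => pvKey v == k))).getD ""

theorem foldl_gmin_some (l : List String) (m : String) :
    l.foldl pvGmin (some m) = some (l.foldl min m) := by
  induction l generalizing m with
  | nil => rfl
  | cons v t ih => simp only [List.foldl_cons]; exact ih (min m v)

theorem pvMinOf_cons (v : String) (t : List String) :
    pvMinOf (v :: t) = some (t.foldl min v) := by
  simp only [pvMinOf, List.foldl_cons]
  exact foldl_gmin_some t v

theorem pvMinOf_spec (l : List String) (h : l ≠ []) :
    ∃ m, pvMinOf l = some m ∧ m ∈ l ∧ ∀ y ∈ l, m ≤ y := by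
  cases l with
  | nil => exact absurd rfl h
  | cons v t =>
    refine ⟨t.foldl min v, pvMinOf_cons v t, ?_, ?_⟩
    · rcases PySem.List.foldl_min_mem t v with h1 | h1
      · rw [h1]; exact List.mem_cons_self
      · exact List.mem_cons_of_mem _ h1
    · intro y hy
      rcases List.mem_cons.mp hy with rfl | hy
      · exact (PySem.List.foldl_min_le t y).1
      · exact (PySem.List.foldl_min_le t v).2 y hy

theorem pvMinOf_perm {l₁ l₂ : List String} (h : l₁.Perm l₂) : pvMinOf l₁ = pvMinOf l₂ := by
  cases hl : l₁ with
  | nil => rw [hl] at h; rw [h.nil_eq.symm]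
  | cons v t =>
    have h1 : l₁ ≠ [] := by rw [hl]; simp
    have h2 : l₂ ≠ [] := by
      intro h2; rw [h2] at h; exact h1 h.eq_nil
    obtain ⟨m1, e1, m1mem, m1le⟩ := pvMinOf_spec l₁ h1
    obtain ⟨m2, e2, m2mem, m2le⟩ := pvMinOf_spec l₂ h2
    rw [← hl, e1, e2]
    have : m1 = m2 :=
      le_antisymm (m1le m2 (h.symm.subset m2mem)) (m2le m1 (h.subset m1mem))
    rw [this]

-- Source B's first loop: the stored value at key k is the running minimum of k's group
theorem get?_bfold (l : List String) (d : PySem.Dict String String) (k : String) :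
    (l.foldl
      (fun (best : PySem.Dict String String) val =>
        let key := pvKey val
        if !(best.contains key) || decide (val < best.getD key "") then best.insert key val
        else best) d).get? k
    = (l.filter (fun v => pvKey v == k)).foldl pvGmin (d.get? k) := by
  induction l generalizing d with
  | nil => rfl
  | cons v t ih =>
    rw [List.foldl_cons, List.filter_cons]
    show (t.foldl _ (if !(d.contains (pvKey v)) || decide (v < d.getD (pvKey v) "")
        then d.insert (pvKey v) v else d)).get? k = _
    by_cases hk : pvKey v = k
    · rw [if_pos (show (pvKey v == k) = true by simp [hk]), List.foldl_cons]
      cases hg : d.get? k with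
      | none =>
        have hc : d.contains (pvKey v) = false := by
          rw [PySem.Dict.contains_eq_isSome_get?, hk, hg]; rfl
        rw [if_pos (by simp [hc]), ih, hk, PySem.Dict.get?_insert_self]
        rfl
      | some m =>
        have hc : d.contains (pvKey v) = true := by
          rw [PySem.Dict.contains_eq_isSome_get?, hk, hg]; rfl
        have hgd : d.getD (pvKey v) "" = m := by
          rw [hk]; exact PySem.Dict.getD_of_get?_eq_some d "" hg
        rw [hc, hgd]
        by_cases hlt : v < m
        · rw [if_pos (by simp [hlt]), ih, hk, PySem.Dict.get?_insert_self]
          have : pvGmin (some m) v = some v := by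
            simp [pvGmin, min_eq_right (le_of_lt hlt)]
          rw [this]
        · rw [if_neg (by simp [hlt]), ih, hg]
          have : pvGmin (some m) v = some m := by
            simp [pvGmin, min_eq_left (le_of_not_gt hlt)]
          rw [this]
    · rw [if_neg (show ¬ ((pvKey v == k) = true) by simp [hk])]
      by_cases hcond : (!(d.contains (pvKey v)) || decide (v < d.getD (pvKey v) "")) = true
      · rw [if_pos hcond, ih, PySem.Dict.get?_insert_of_ne _ _ (fun h => hk h.symm)]
      · rw [if_neg hcond]
        exact ih d

theorem nodup_keys_bfold (l : List String) (d : PySem.Dict String String)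
    (h : d.keys.Nodup) :
    (l.foldl
      (fun (best : PySem.Dict String String) val =>
        let key := pvKey val
        if !(best.contains key) || decide (val < best.getD key "") then best.insert key val
        else best) d).keys.Nodup := by
  induction l generalizing d with
  | nil => exact h
  | cons v t ih =>
    rw [List.foldl_cons]
    show (t.foldl _ (if !(d.contains (pvKey v)) || decide (v < d.getD (pvKey v) "")
        then d.insert (pvKey v) v else d)).keys.Nodup
    by_cases hcond : (!(d.contains (pvKey v)) || decide (v < d.getD (pvKey v) "")) = true
    · rw [if_pos hcond]
      exact ih _ (PySem.Dict.nodup_keys_insert d _ _ h)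
    · rw [if_neg hcond]
      exact ih _ h

theorem pvMrep_head (v : String) (t : List String) (h : ∀ u ∈ t, v ≤ u) :
    pvMrep (v :: t) (pvKey v) = v := by
  unfold pvMrep
  rw [List.filter_cons_of_pos (by simp)]
  rw [pvMinOf_cons]
  have hle : (t.filter (fun u => pvKey u == pvKey v)).foldl min v ≤ v :=
    (PySem.List.foldl_min_le _ v).1
  have hge : v ≤ (t.filter (fun u => pvKey u == pvKey v)).foldl min v := by
    rcases PySem.List.foldl_min_mem (t.filter (fun u => pvKey u == pvKey v)) v with h1 | h1
    · rw [h1]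
    · exact h _ (List.mem_of_mem_filter h1)
  rw [le_antisymm hle hge]
  rfl

theorem pvMrep_cons_ne (v : String) (t : List String) (k : String) (h : k ≠ pvKey v) :
    pvMrep (v :: t) k = pvMrep t k := by
  unfold pvMrep
  rw [List.filter_cons_of_neg (by simp [Ne.symm h])]

theorem pvMrep_filter_ne (t : List String) (k0 k : String) (h : k ≠ k0) :
    pvMrep (t.filter (fun u => pvKey u != k0)) k = pvMrep t k := by
  unfold pvMrep
  rw [List.filter_filter]
  congr 1
  apply congrArg
  apply List.filter_congr
  intro u _
  by_cases hu : pvKey u = k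
  · simp [hu, h]
  · simp [hu]

-- first-occurrence dedup: set-accumulator fold with a fresh head peels it off
theorem foldl_add_cons (l : List String) (acc : List String) (x : String) (hx : x ∉ acc) :
    l.foldl PySem.Set.add (x :: acc) = x :: (l.filter (fun y => y != x)).foldl PySem.Set.add acc := by
  induction l generalizing acc with
  | nil => rfl
  | cons v t ih =>
    simp only [List.foldl_cons, List.filter_cons]
    by_cases hvx : v = x
    · have : PySem.Set.add (x :: acc) v = x :: acc := by
        simp [PySem.Set.add, PySem.Set.contains, hvx]
      rw [this]
      simp only [hvx, bne_self_eq_false, Bool.false_eq_true, if_neg, not_false_iff]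
      exact ih acc hx
    · have hbne : (v != x) = true := by simp [hvx]
      simp only [hbne, if_pos]
      by_cases hva : v ∈ acc
      · have h1 : PySem.Set.add (x :: acc) v = x :: acc := by
          simp [PySem.Set.add, PySem.Set.contains, hva]
        have h2 : PySem.Set.add acc v = acc := by
          simp [PySem.Set.add, PySem.Set.contains, hva]
        rw [h1, List.foldl_cons, h2]
        exact ih acc hx
      · have h1 : PySem.Set.add (x :: acc) v = x :: (acc ++ [v]) := by
          simp [PySem.Set.add, PySem.Set.contains, hva, hvx]
        have h2 : PySem.Set.add acc v = acc ++ [v] := by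
          simp [PySem.Set.add, PySem.Set.contains, hva]
        rw [h1, List.foldl_cons, h2]
        exact ih (acc ++ [v]) (by simp [hx, (Ne.symm hvx : x ≠ v)])

theorem ofList_cons (x : String) (l : List String) :
    PySem.Set.ofList (x :: l) = x :: PySem.Set.ofList (l.filter (fun y => y != x)) := by
  rw [PySem.Set.ofList_eq_foldl, PySem.Set.ofList_eq_foldl, List.foldl_cons]
  have : PySem.Set.add [] x = [x] := rfl
  rw [this]
  exact foldl_add_cons l [] x (by simp)

-- the key fact: on a sorted list, the distinct truncated keys in first-occurrence order
-- have strictly increasing minimal representatives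
theorem pairwise_mrep : ∀ (n : Nat) (t : List String), t.length ≤ n → t.Pairwise (· ≤ ·) →
    (PySem.Set.ofList (t.map pvKey)).Pairwise (fun a b => pvMrep t a < pvMrep t b) := by
  intro n
  induction n with
  | zero =>
    intro t ht _
    rw [List.length_eq_zero_iff.mp (Nat.le_zero.mp ht)]
    exact List.Pairwise.nil
  | succ n ih =>
    intro t ht hp
    cases t with
    | nil => exact List.Pairwise.nil
    | cons v t2 =>
      obtain ⟨h1, h2⟩ := List.pairwise_cons.mp hp
      rw [List.map_cons, ofList_cons]
      have hfm : (t2.map pvKey).filter (fun y => y != pvKey v)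
          = (t2.filter (fun u => pvKey u != pvKey v)).map pvKey := by
        rw [List.filter_map]; rfl
      rw [hfm]
      set t' := t2.filter (fun u => pvKey u != pvKey v) with ht'
      have hmemne : ∀ b ∈ PySem.Set.ofList (t'.map pvKey), b ≠ pvKey v := by
        intro b hb
        obtain ⟨u, hu, rfl⟩ := List.mem_map.mp ((PySem.Set.mem_ofList _ _).mp hb)
        have := List.of_mem_filter hu
        simpa using this
      have hmem2 : ∀ b ∈ PySem.Set.ofList (t'.map pvKey), ∃ u ∈ t2, pvKey u = b := by
        intro b hb
        obtain ⟨u, hu, rfl⟩ := List.mem_map.mp ((PySem.Set.mem_ofList _ _).mp hb)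
        exact ⟨u, List.mem_of_mem_filter hu, rfl⟩
      constructor
      · intro b hb
        have hbne := hmemne b hb
        obtain ⟨u, hu2, hub⟩ := hmem2 b hb
        rw [pvMrep_head v t2 h1, pvMrep_cons_ne v t2 b hbne]
        have hfne : t2.filter (fun w => pvKey w == b) ≠ [] := by
          intro hnil
          have : u ∈ t2.filter (fun w => pvKey w == b) := List.mem_filter.mpr ⟨hu2, by simp [hub]⟩
          rw [hnil] at this; exact absurd this (List.not_mem_nil)
        obtain ⟨m, em, mmem, _⟩ := pvMinOf_spec _ hfne
        have hmrep : pvMrep t2 b = m := by unfold pvMrep; rw [em]; rfl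
        rw [hmrep]
        have hm2 := List.mem_filter.mp mmem
        have hvm : v ≤ m := h1 m hm2.1
        have hne : v ≠ m := by
          intro he
          apply hbne
          have : pvKey m = b := by simpa using hm2.2
          rw [← this, ← he]
        exact lt_of_le_of_ne hvm hne
      · have hlen : t'.length ≤ n := by
          rw [ht']
          have hf := List.length_filter_le (fun u => pvKey u != pvKey v) t2
          simp only [List.length_cons] at ht
          omega
        have hp' : t'.Pairwise (· ≤ ·) := by
          rw [ht']
          exact h2.sublist List.filter_sublist
        have := ih t' hlen hp'
        refine this.imp_of_mem ?_
        intro a b ha hb hab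
        have hae : pvMrep (v :: t2) a = pvMrep t' a := by
          rw [pvMrep_cons_ne v t2 a (hmemne a ha), ← pvMrep_filter_ne t2 (pvKey v) a (hmemne a ha)]
        have hbe : pvMrep (v :: t2) b = pvMrep t' b := by
          rw [pvMrep_cons_ne v t2 b (hmemne b hb), ← pvMrep_filter_ne t2 (pvKey v) b (hmemne b hb)]
        rw [hae, hbe]
        exact hab

-- re-inserting an existing key with its own value leaves the dict unchanged (A's skip branch)
theorem insert_self_of_contains (d : PySem.Dict String String) (k : String)
    (hval : ∀ p ∈ d.items, p.2 = p.1) (hc : d.contains k = true) :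
    d.insert k k = d := by
  apply PySem.Dict.ext
  rw [PySem.Dict.items_insert_of_contains _ _ hc]
  have hcong : ∀ p ∈ d.items, (if (p.1 == k) = true then (k, k) else p) = id p := by
    intro p hp
    by_cases h : p.1 = k
    · have := hval p hp
      cases p; simp_all
    · simp [h]
  rw [List.map_congr_left hcong, List.map_id]

-- A's loop with its seen-set is the plain key-insertion loop
theorem loop_eq (vs : List String) (d : PySem.Dict String String) (s : PySem.Set String)
    (hval : ∀ p ∈ d.items, p.2 = p.1)
    (hmem : ∀ x, PySem.Set.contains s x = d.contains x) :
    (vs.foldl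
      (fun (st : PySem.Dict String String × PySem.Set String) val =>
        let value := val
        let index := PySem.Str.find value "."
        let value := if index ≠ -1 then PySem.Str.slice value (some 0) (some index) else value
        if PySem.Set.contains st.2 value then st
        else (st.1.insert value value, PySem.Set.add st.2 value)) (d, s)).1
    = (vs.map pvKey).foldl (fun (d : PySem.Dict String String) k => d.insert k k) d := by
  induction vs generalizing d s with
  | nil => rfl
  | cons v t ih =>
    simp only [List.foldl_cons, List.map_cons]
    show (t.foldl _ (if PySem.Set.contains s (pvKey v) then (d, s)
        else (d.insert (pvKey v) (pvKey v), PySem.Set.add s (pvKey v)))).1 = _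
    by_cases h : pvKey v ∈ s
    · have hb : PySem.Set.contains s (pvKey v) = true := by
        simpa [PySem.Set.contains] using h
      rw [if_pos hb]
      have hc : d.contains (pvKey v) = true := by rw [← hmem]; exact hb
      rw [ih d s hval hmem, insert_self_of_contains d _ hval hc]
    · have hb : PySem.Set.contains s (pvKey v) = false := by
        simpa [PySem.Set.contains] using h
      rw [if_neg (fun hh => by rw [hb] at hh; exact Bool.false_ne_true hh)]
      apply ih
      · intro p hp
        have hc : d.contains (pvKey v) = false := by rw [← hmem]; exact hb
        rw [PySem.Dict.items_insert_of_not_contains _ _ hc] at hp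
        rcases List.mem_append.mp hp with h1 | h1
        · exact hval p h1
        · simp at h1; simp [h1]
      · intro x
        have : PySem.Set.contains (PySem.Set.add s (pvKey v)) x
            = (decide (x ∈ PySem.Set.add s (pvKey v)) : Bool) := by
          simp [PySem.Set.contains]
        rw [this, PySem.Dict.contains_insert]
        by_cases hx : x ∈ PySem.Set.add s (pvKey v)
        · rcases (PySem.Set.mem_add s (pvKey v) x).mp hx with h1 | h1
          · have := hmem x
            simp [PySem.Set.contains, h1] at this
            simp [hx, ← this]
          · simp [h1]
        · have h1 : ¬ x ∈ s := fun hxs => hx ((PySem.Set.mem_add s (pvKey v) x).mpr (Or.inl hxs))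
          have h2 : x ≠ pvKey v := fun hxe => hx ((PySem.Set.mem_add s (pvKey v) x).mpr (Or.inr hxe))
          have := hmem x
          simp [PySem.Set.contains, h1] at this
          simp [hx, h2, ← this]

-- inserting k ↦ k for each k in l builds exactly the dedup of l, paired with itself
theorem dictcomp_items (l : List String) :
    ((l.foldl (fun (d : PySem.Dict String String) k => d.insert k k) PySem.Dict.empty)).items
    = (PySem.Set.ofList l).map (fun k => (k, k)) := by
  set d := l.foldl (fun (d : PySem.Dict String String) k => d.insert k k) PySem.Dict.empty with hd
  have hkeys : d.keys = PySem.Set.ofList l := by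
    rw [hd, PySem.Dict.keys_foldl_insert l (fun _ x => x) PySem.Dict.empty]
    rw [PySem.Set.ofList_eq_foldl]
    rfl
  have hnodup : d.keys.Nodup := by
    rw [hkeys]; exact PySem.Set.nodup_ofList l
  have hval : ∀ p ∈ d.items, p.2 = p.1 := by
    rw [hd]
    have : ∀ (l : List String) (d0 : PySem.Dict String String),
        (∀ p ∈ d0.items, p.2 = p.1) →
        ∀ p ∈ (l.foldl (fun (d : PySem.Dict String String) k => d.insert k k) d0).items, p.2 = p.1 := by
      intro l
      induction l with
      | nil => intro d0 h; exact h
      | cons k t ih =>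
        intro d0 h
        simp only [List.foldl_cons]
        apply ih
        intro p hp
        rcases (PySem.Dict.mem_items_insert _ _ _ _).mp hp with rfl | ⟨hp2, _⟩
        · rfl
        · exact h p hp2
    exact this l PySem.Dict.empty (by intro p hp; simp [PySem.Dict.empty] at hp)
  rw [PySem.Dict.items_eq_map_keys d hnodup "", hkeys]
  apply List.map_congr_left
  intro k hk
  have : (k, d.getD k "") ∈ d.items := by
    rw [PySem.Dict.items_eq_map_keys d hnodup "", hkeys]
    exact List.mem_map.mpr ⟨k, hk, rfl⟩
  have := hval _ this
  simp at this
  rw [this]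

-- A's result: the deduped truncated keys of the sorted list, each paired with itself
theorem A_eq (array : List String) :
    sortFontsArray array
    = (PySem.Set.ofList ((PySem.List.sorted array (fun x => x) false).map pvKey)).map
        (fun k => (k, k)) := by
  show (((PySem.List.sorted array (fun x => x) false).foldl _
      (PySem.Dict.empty, PySem.Set.empty)).1 : PySem.Dict String String).items = _
  rw [loop_eq _ _ _ (by intro p hp; simp [PySem.Dict.empty] at hp)
      (by intro x; simp [PySem.Set.contains, PySem.Set.empty])]
  exact dictcomp_items _

-- B's result is the same list
theorem B_eq (array : List String) :
    sortFontsArray_alt array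
    = (PySem.Set.ofList ((PySem.List.sorted array (fun x => x) false).map pvKey)).map
        (fun k => (k, k)) := by
  show ((PySem.List.sorted
      (array.foldl (fun (best : PySem.Dict String String) val =>
        let key := pvKey val
        if !(best.contains key) || decide (val < best.getD key "") then best.insert key val
        else best) PySem.Dict.empty).keys
      (fun k => (array.foldl (fun (best : PySem.Dict String String) val =>
        let key := pvKey val
        if !(best.contains key) || decide (val < best.getD key "") then best.insert key val
        else best) PySem.Dict.empty).getD k "") false).foldl
      (fun (output : PySem.Dict String String) key => output.insert key key)
      PySem.Dict.empty).items = _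
  set best := array.foldl (fun (best : PySem.Dict String String) val =>
      let key := pvKey val
      if !(best.contains key) || decide (val < best.getD key "") then best.insert key val
      else best) PySem.Dict.empty with hbest
  set s := PySem.List.sorted array (fun x => x) false with hs
  set D := PySem.Set.ofList (s.map pvKey) with hD
  have hperm_s : s.Perm array := by rw [hs]; exact PySem.List.sorted_perm array (fun x => x) false
  have hget : ∀ k, best.get? k = pvMinOf (array.filter (fun v => pvKey v == k)) := by
    intro k
    rw [hbest, get?_bfold]
    rfl
  have hbf : ∀ k, best.getD k "" = pvMrep s k := by
    intro k
    rw [PySem.Dict.getD_eq_get?_getD, hget k]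
    unfold pvMrep
    rw [pvMinOf_perm (hperm_s.filter (fun v => pvKey v == k))]
  have hkn : best.keys.Nodup := by
    rw [hbest]; exact nodup_keys_bfold array PySem.Dict.empty PySem.Dict.nodup_keys_empty
  have hDn : D.Nodup := by rw [hD]; exact PySem.Set.nodup_ofList _
  have hmem : ∀ k, k ∈ D ↔ k ∈ best.keys := by
    intro k
    rw [← PySem.Dict.contains_iff_mem_keys, PySem.Dict.contains_eq_isSome_get?, hget k]
    rw [hD, PySem.Set.mem_ofList]
    constructor
    · intro hk
      obtain ⟨u, hu, rfl⟩ := List.mem_map.mp hk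
      have hu' : u ∈ array := hperm_s.subset hu
      have : u ∈ array.filter (fun v => pvKey v == pvKey u) := List.mem_filter.mpr ⟨hu', by simp⟩
      have hne : array.filter (fun v => pvKey v == pvKey u) ≠ [] := List.ne_nil_of_mem this
      obtain ⟨m, em, _, _⟩ := pvMinOf_spec _ hne
      rw [em]; rfl
    · intro hk
      by_contra hnk
      have : array.filter (fun v => pvKey v == k) = [] := by
        apply List.filter_eq_nil_iff.mpr
        intro u hu hb
        apply hnk
        exact List.mem_map.mpr ⟨u, hperm_s.symm.subset hu, by simpa using hb⟩
      rw [this] at hk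
      simp [pvMinOf] at hk
  have hperm : D.Perm best.keys :=
    (List.perm_ext_iff_of_nodup hDn hkn).mpr hmem
  have hpair : D.Pairwise (fun a b => best.getD a "" < best.getD b "") := by
    have hsp : s.Pairwise (· ≤ ·) := by
      rw [hs]
      have := PySem.List.sorted_pairwise array (fun x => x)
      simpa using this
    have hmr := pairwise_mrep s.length s le_rfl hsp
    rw [← hD] at hmr
    refine hmr.imp ?_
    intro a b hab
    rw [hbf a, hbf b]
    exact hab
  have hsorted : PySem.List.sorted best.keys (fun k => best.getD k "") false = D :=
    PySem.List.sorted_eq_of_perm_of_pairwise_lt best.keys D (fun k => best.getD k "") hperm hpair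
  rw [hsorted]
  rw [PySem.Dict.items_foldl_insert_fresh D (fun a => a) (fun a => a) PySem.Dict.empty
    (by intro a _; rfl) (by simpa using hDn)]
  rfl

-- ===== VERDICT (by name: the statement is the Claim_ definition above) =====
theorem sortFontsArray_spec : Claim_equal_sortFontsArray := by
  intro array _
  show sortFontsArray array = sortFontsArray_alt array
  rw [A_eq, B_eq]
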